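-- pv_equiv track=rewrite | github.com/daniel-reich/ubiquitous-fiesta | jgpfraMtc9nrrPZkL_24.py | switch_gravity_on
-- ===== SOURCE A (Python) =====
-- def switch_gravity_on(lst):
--   for row in range(len(lst)):
--     for col in range(len(lst[0])):
--       if lst[row][col] == '#':
--         for r in range(len(lst)-1,row,-1):
--           if lst[r][col] == '-':
--             lst[r][col] = '#'
--             lst[row][col] = '-'
--             break
--   return lst
-- ===== SOURCE B (Python) =====
-- def switch_gravity_on(lst):
--     n = len(lst)
--     width = len(lst[0]) if lst else 0
--     hashes = [0] * width      # '#' count per column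
--     remaining = [0] * width   # '#'/'-' slot count per column (then: slots not yet emitted)
--     for row in lst:
--         for c in range(width):
--             v = row[c]
--             if v == '#':
--                 hashes[c] += 1
--                 remaining[c] += 1
--             elif v == '-':
--                 remaining[c] += 1
--     out = []
--     for row in lst:
--         new_row = list(row)
--         for c in range(width):
--             if row[c] in ('#', '-'):
--                 remaining[c] -= 1
--                 new_row[c] = '#' if remaining[c] < hashes[c] else '-'
--         out.append(new_row)
--     return out
-- ===== Notes on version B (the rewrite author's own statement) =====
-- stated objective: alternative
-- what changed: B replaces A's in-place simulation (for every '#' cell a bottom-up rescan of its column for the lowest '-') by per-column counting: it counts '#' and '#'/'-' slot cells per column, then fills each column's slot cells with '-' on top and '#' at the bottom; B returns a new grid (A mutates and returns its argument).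
import Mathlib
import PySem

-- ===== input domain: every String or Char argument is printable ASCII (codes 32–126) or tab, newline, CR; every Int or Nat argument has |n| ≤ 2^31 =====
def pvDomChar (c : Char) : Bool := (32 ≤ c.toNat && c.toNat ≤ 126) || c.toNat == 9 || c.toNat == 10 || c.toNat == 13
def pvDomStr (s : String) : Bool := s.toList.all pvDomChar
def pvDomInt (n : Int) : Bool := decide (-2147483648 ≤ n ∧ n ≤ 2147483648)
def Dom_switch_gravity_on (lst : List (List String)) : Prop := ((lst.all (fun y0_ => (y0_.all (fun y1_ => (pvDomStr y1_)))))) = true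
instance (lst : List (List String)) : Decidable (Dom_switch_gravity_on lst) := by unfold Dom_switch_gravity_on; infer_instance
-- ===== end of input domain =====

-- B replaces A's per-'#' bottom-up column rescans by per-column counting ('-' slots on top,
-- '#' slots at the bottom); A mutates and returns its argument, B returns a fresh grid — the
-- equivalence proved here is about the return value only.

-- ===== PORT A =====
-- lst[r][c]  (indices here are always ≥ 0, produced by range(...))
def pvGet2 (g : List (List String)) (r c : Nat) : String := (g.getD r []).getD c ""
-- lst[r][c] = v
def pvSet2 (g : List (List String)) (r c : Nat) (v : String) : List (List String) :=
  g.set r ((g.getD r []).set c v)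

-- 'for r in range(len(lst)-1, row, -1): if lst[r][col] == '-': …; break'
def pvInnerA (row col : Nat) (g : List (List String)) : List Nat → List (List String)
  | [] => g
  | r :: rest =>
    if pvGet2 g r col = "-" then
      pvSet2 (pvSet2 g r col "#") row col "-"
    else pvInnerA row col g rest

-- body of the 'if lst[row][col] == '#':' statement
def pvBodyA (g : List (List String)) (row col : Nat) : List (List String) :=
  if pvGet2 g row col = "#" then
    pvInnerA row col g ((List.range' (row + 1) (g.length - 1 - row)).reverse)
  else g

def switch_gravity_on (lst : List (List String)) : List (List String) :=
  (List.range lst.length).foldl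
    (fun g row =>
      (List.range (g.getD 0 []).length).foldl (fun g2 col => pvBodyA g2 row col) g)
    lst

-- ===== PORT B =====
def switch_gravity_on_alt (lst : List (List String)) : List (List String) :=
  let width := (lst.headD []).length
  -- hashes[c] = number of '#' in column c
  let hashes := (List.range width).map (fun c => lst.countP (fun row => row.getD c "" == "#"))
  -- below-table: p.1 is the list of per-row slot-suffix-counts, built bottom-up; p.2 the running acc
  let p := lst.reverse.foldl
    (fun (st : List (List Nat) × List Nat) row =>
      (st.1 ++ [st.2],
       (List.range width).map (fun c =>
         st.2.getD c 0 + (if row.getD c "" = "#" ∨ row.getD c "" = "-" then 1 else 0))))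
    ([], List.replicate width 0)
  let below := p.1.reverse
  lst.mapIdx (fun r row =>
    row.mapIdx (fun c v =>
      if c < width ∧ (v = "#" ∨ v = "-") then
        (if (below.getD r []).getD c 0 < hashes.getD c 0 then "#" else "-")
      else v))

-- ===== PRECONDITION & SPEC =====
-- Pre_ excludes exactly the inputs where A raises IndexError: some row shorter than row 0
-- (A reads lst[row][col] for every col < len(lst[0])).
def Pre_switch_gravity_on (lst : List (List String)) : Prop :=
  ∀ row ∈ lst, (lst.headD []).length ≤ row.length
instance (lst : List (List String)) : Decidable (Pre_switch_gravity_on lst) := by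
  unfold Pre_switch_gravity_on; infer_instance
def pvWitness_switch_gravity_on : List (List String) := [["-", "#"], ["#", "-"]]

def Spec_switch_gravity_on (lst : List (List String)) (out : List (List String)) : Prop :=
  out = switch_gravity_on_alt lst
instance (lst : List (List String)) (out : List (List String)) : Decidable (Spec_switch_gravity_on lst out) := by
  unfold Spec_switch_gravity_on; infer_instance

-- ===== CLAIM (what is proved, stated in full; the proofs are below) =====
def Claim_equal_switch_gravity_on : Prop :=
  ∀ (lst : List (List String)), Dom_switch_gravity_on lst → Pre_switch_gravity_on lst →
    Spec_switch_gravity_on lst (switch_gravity_on lst)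

-- ===== LEMMAS AND PROOFS =====

-- proof-only abbreviations
def pvSlot (s : String) : Bool := s == "#" || s == "-"
def pvWidth (lst : List (List String)) : Nat := (lst.getD 0 []).length
-- number of '#' in column c
def pvK (h : List (List String)) (c : Nat) : Nat :=
  (List.range h.length).countP (fun r => pvGet2 h r c == "#")
-- number of '#'/'-' slot cells strictly below row r in column c
def pvSB (lst : List (List String)) (r c : Nat) : Nat :=
  (List.range' (r + 1) (lst.length - (r + 1))).countP (fun r' => pvSlot (pvGet2 lst r' c))

-- loop invariant relating the current grid g to the original lst
def pvInv (lst g : List (List String)) : Prop :=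
  g.length = lst.length ∧
  (∀ r, (g.getD r []).length = (lst.getD r []).length) ∧
  (∀ r c, ¬(c < pvWidth lst ∧ pvSlot (pvGet2 lst r c) = true) → pvGet2 g r c = pvGet2 lst r c) ∧
  (∀ r c, pvSlot (pvGet2 g r c) = pvSlot (pvGet2 lst r c)) ∧
  (∀ c, pvK g c = pvK lst c)

-- "every '#' strictly before position (row, col) in scan order has no '-' below it"
def pvSettled (lst g : List (List String)) (row col : Nat) : Prop :=
  ∀ r c r', c < pvWidth lst → (r < row ∨ (r = row ∧ c < col)) → r < r' →
    pvGet2 g r c = "#" → pvGet2 g r' c ≠ "-"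


-- ---------- basic getD/set lemmas ----------
theorem pvGetD_set {α : Type} (l : List α) (i j : Nat) (v d : α) :
    (l.set i v).getD j d = if j = i ∧ i < l.length then v else l.getD j d := by
  simp only [List.getD, List.getElem?_set]
  by_cases hj : i = j
  · subst hj; by_cases h2 : i < l.length <;> simp [h2]
  · rw [if_neg hj, if_neg (by exact fun h => hj h.1.symm)]

theorem pvGet2_out (g : List (List String)) (r c : Nat) (h : g.length ≤ r) :
    pvGet2 g r c = "" := by
  unfold pvGet2
  rw [List.getD_eq_default _ _ h]
  rfl

theorem pvSet2_length (g : List (List String)) (r c : Nat) (v : String) :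
    (pvSet2 g r c v).length = g.length := by simp [pvSet2]

theorem pvSet2_rowlen (g : List (List String)) (r c : Nat) (v : String) (r' : Nat) :
    ((pvSet2 g r c v).getD r' []).length = (g.getD r' []).length := by
  unfold pvSet2; rw [pvGetD_set]
  split
  · next h => rw [h.1]; simp
  · rfl

theorem pvGet2_set2 (g : List (List String)) (r c : Nat) (v : String) (r' c' : Nat)
    (hr : r < g.length) (hc : c < (g.getD r []).length) :
    pvGet2 (pvSet2 g r c v) r' c' = if r' = r ∧ c' = c then v else pvGet2 g r' c' := by
  unfold pvGet2 pvSet2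
  rw [pvGetD_set]
  by_cases h1 : r' = r
  · rw [if_pos ⟨h1, hr⟩, pvGetD_set]
    by_cases h2 : c' = c
    · rw [if_pos ⟨h2, hc⟩, if_pos ⟨h1, h2⟩]
    · rw [if_neg (fun h => h2 h.1), if_neg (fun h => h2 h.2)]
      rw [h1]
  · rw [if_neg (fun h => h1 h.1), if_neg (fun h => h1 h.1)]

-- ---------- inner loop: first '-' from the bottom ----------
theorem pvInnerA_eq_find (row col : Nat) (g : List (List String)) (rs : List Nat) :
    pvInnerA row col g rs =
      match rs.find? (fun r => pvGet2 g r col == "-") with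
      | none => g
      | some rst => pvSet2 (pvSet2 g rst col "#") row col "-" := by
  induction rs with
  | nil => simp [pvInnerA]
  | cons r rest ih =>
      rw [pvInnerA, List.find?]
      by_cases h : pvGet2 g r col = "-"
      · simp [h]
      · simp only [h, if_false, ih]
        have : (pvGet2 g r col == "-") = false := by simp [h]
        rw [this]

theorem pvFind_revRange (s cnt : Nat) (p : Nat → Bool) :
    (((List.range' s cnt).reverse.find? p = none) ∧ ∀ r, s ≤ r → r < s + cnt → p r = false) ∨
    (∃ rst, (List.range' s cnt).reverse.find? p = some rst ∧ s ≤ rst ∧ rst < s + cnt ∧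
      p rst = true ∧ ∀ r, rst < r → r < s + cnt → p r = false) := by
  induction cnt with
  | zero =>
      left
      refine ⟨by simp, ?_⟩
      intro r h1 h2; omega
  | succ m ih =>
      have hconcat : List.range' s (m+1) = List.range' s m ++ [s+m] := by
        have := List.range'_concat (s := s) (n := m) (step := 1); simpa using this
      rw [hconcat, List.reverse_append]
      simp only [List.reverse_cons, List.reverse_nil, List.nil_append, List.cons_append,
        List.nil_append, List.find?]
      by_cases hp : p (s+m)
      · right; exact ⟨s+m, by simp [hp], by omega, by omega, hp, by intro r h1 h2; omega⟩
      · simp only [hp]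
        rcases ih with ⟨hn, hall⟩ | ⟨rst, hfind, h1, h2, h3, hall⟩
        · left; refine ⟨by simpa using hn, ?_⟩
          intro r hr1 hr2
          by_cases hr : r < s + m
          · exact hall r hr1 hr
          · have : r = s + m := by omega
            subst this; simpa using hp
        · right; refine ⟨rst, by simpa using hfind, h1, by omega, h3, ?_⟩
          intro r hr1 hr2
          by_cases hr : r < s + m
          · exact hall r hr1 hr
          · have : r = s + m := by omega
            subst this; simpa using hp

-- ---------- counting over ranges ----------
theorem pvCountP_range_sum (n : Nat) (p : Nat → Bool) :
    (List.range n).countP p = ∑ i ∈ Finset.range n, (if p i then 1 else 0) := by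
  induction n with
  | zero => simp
  | succ m ih => rw [List.range_succ, List.countP_append, Finset.sum_range_succ, ih]
                 simp [List.countP_cons]

theorem pvCountP_range_swap (n a b : Nat) (p q : Nat → Bool)
    (ha : a < n) (hb : b < n) (hab : a ≠ b)
    (hpa : p a = true) (hqa : q a = false) (hpb : p b = false) (hqb : q b = true)
    (hrest : ∀ i, i ≠ a → i ≠ b → p i = q i) :
    (List.range n).countP p = (List.range n).countP q := by
  rw [pvCountP_range_sum, pvCountP_range_sum]
  have hma : a ∈ Finset.range n := Finset.mem_range.mpr ha
  have hmb : b ∈ (Finset.range n).erase a := Finset.mem_erase.mpr ⟨Ne.symm hab, Finset.mem_range.mpr hb⟩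
  have key : ∀ f : Nat → Nat, ∑ i ∈ Finset.range n, f i =
      f a + (f b + ∑ i ∈ ((Finset.range n).erase a).erase b, f i) := by
    intro f
    rw [← Finset.add_sum_erase _ f hma, ← Finset.add_sum_erase _ f hmb]
  rw [key, key]
  have hcong : ∑ i ∈ ((Finset.range n).erase a).erase b, (if p i then 1 else 0) =
      ∑ i ∈ ((Finset.range n).erase a).erase b, (if q i then 1 else 0) := by
    apply Finset.sum_congr rfl
    intro i hi
    have hib : i ≠ b := (Finset.mem_erase.mp hi).1
    have hia : i ≠ a := (Finset.mem_erase.mp (Finset.mem_erase.mp hi).2).1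
    rw [hrest i hia hib]
  rw [hcong, hpa, hqa, hpb, hqb]
  simp

theorem pvCountP_getD_range {α : Type} (h : List α) (p : α → Bool) (d : α) :
    h.countP p = (List.range h.length).countP (fun i => p (h.getD i d)) := by
  induction h with
  | nil => simp
  | cons x t ih =>
      rw [List.countP_cons, List.length_cons, List.range_succ_eq_map, List.countP_cons,
        List.countP_map, ih]
      have : List.countP ((fun i => p ((x :: t).getD i d)) ∘ Nat.succ) (List.range t.length) =
          List.countP (fun i => p (t.getD i d)) (List.range t.length) := by
        apply List.countP_congr
        intro i _
        rfl
      simp only [List.getD_cons_zero]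
      omega

theorem pvCountP_drop_range' {α : Type} (h : List α) (m : Nat) (p : α → Bool) (d : α) :
    (h.drop m).countP p = (List.range' m (h.length - m)).countP (fun i => p (h.getD i d)) := by
  rw [pvCountP_getD_range (h.drop m) p d, List.length_drop]
  rw [List.range'_eq_map_range, List.countP_map]
  apply List.countP_congr
  intro i hi
  simp only [Function.comp]
  simp [List.getD, List.getElem?_drop]

-- ---------- the step lemma ----------
theorem pvBody_step (lst g : List (List String)) (row col : Nat)
    (pre : ∀ r < lst.length, pvWidth lst ≤ (lst.getD r []).length)
    (hrow : row < lst.length) (hcol : col < pvWidth lst)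
    (hInv : pvInv lst g) (hS : pvSettled lst g row col) :
    pvInv lst (pvBodyA g row col) ∧ pvSettled lst (pvBodyA g row col) row (col+1) := by
  obtain ⟨hlen, hrlen, hpres, hslot, hK⟩ := hInv
  have hrowg : row < g.length := by omega
  unfold pvBodyA
  by_cases hh : pvGet2 g row col = "#"
  case neg =>
    rw [if_neg hh]
    refine ⟨⟨hlen, hrlen, hpres, hslot, hK⟩, ?_⟩
    intro r c r' hcw hpos hlt hH
    apply hS r c r' hcw ?_ hlt hH
    rcases hpos with h1 | ⟨h1, h2⟩
    · exact Or.inl h1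
    · by_cases hc : c < col
      · exact Or.inr ⟨h1, hc⟩
      · exfalso
        apply hh
        have hceq : c = col := by omega
        rw [← h1, ← hceq]
        exact hH
  case pos =>
    rw [if_pos hh, pvInnerA_eq_find]
    rcases pvFind_revRange (row+1) (g.length - 1 - row) (fun r => pvGet2 g r col == "-") with
      ⟨hfn, hall⟩ | ⟨rst, hfind, h1, h2, h3, hall⟩
    · rw [hfn]
      refine ⟨⟨hlen, hrlen, hpres, hslot, hK⟩, ?_⟩
      intro r c r' hcw hpos hlt hH
      rcases hpos with hp1 | ⟨hp1, hp2⟩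
      · exact hS r c r' hcw (Or.inl hp1) hlt hH
      · by_cases hc : c < col
        · exact hS r c r' hcw (Or.inr ⟨hp1, hc⟩) hlt hH
        · have hceq : c = col := by omega
          subst hceq hp1
          intro hcontra
          by_cases hr' : r' < g.length
          · have := hall r' (by omega) (by omega)
            simp [hcontra] at this
          · rw [pvGet2_out g r' c (by omega)] at hcontra
            exact absurd hcontra (by decide)
    · rw [hfind]
      have hrstg : rst < g.length := by omega
      have hrstrow : rst ≠ row := by omega
      have hdash : pvGet2 g rst col = "-" := by simpa using h3
      have hwr : ∀ r0, r0 < g.length → col < (g.getD r0 []).length := by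
        intro r0 h0
        rw [hrlen r0]
        exact lt_of_lt_of_le hcol (pre r0 (by omega))
      have hcolrst : col < (g.getD rst []).length := hwr rst hrstg
      have hcolrow : col < (g.getD row []).length := hwr row hrowg
      have hg'get : ∀ x y, pvGet2 (pvSet2 (pvSet2 g rst col "#") row col "-") x y =
          if x = row ∧ y = col then "-" else if x = rst ∧ y = col then "#" else pvGet2 g x y := by
        intro x y
        rw [pvGet2_set2 (pvSet2 g rst col "#") row col "-" x y
              (by rw [pvSet2_length]; exact hrowg)
              (by rw [pvSet2_rowlen]; exact hcolrow)]
        by_cases hxy : x = row ∧ y = col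
        · rw [if_pos hxy, if_pos hxy]
        · rw [if_neg hxy, if_neg hxy, pvGet2_set2 g rst col "#" x y hrstg hcolrst]
      have hnoup : ∀ j, j < row → pvGet2 g j col ≠ "#" := by
        intro j hj hcontra
        exact hS j col rst hcol (Or.inl hj) (by omega) hcontra hdash
      have hglen' : (pvSet2 (pvSet2 g rst col "#") row col "-").length = g.length := by
        rw [pvSet2_length, pvSet2_length]
      constructor
      · refine ⟨by rw [hglen']; exact hlen, ?_, ?_, ?_, ?_⟩
        · intro r
          rw [pvSet2_rowlen, pvSet2_rowlen]
          exact hrlen r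
        · intro r c hn
          rw [hg'get]
          by_cases ha : r = row ∧ c = col
          · exfalso
            apply hn
            refine ⟨ha.2 ▸ hcol, ?_⟩
            rw [ha.1, ha.2, ← hslot row col, hh]
            rfl
          · rw [if_neg ha]
            by_cases hb : r = rst ∧ c = col
            · exfalso
              apply hn
              refine ⟨hb.2 ▸ hcol, ?_⟩
              rw [hb.1, hb.2, ← hslot rst col, hdash]
              rfl
            · rw [if_neg hb]
              exact hpres r c hn
        · intro r c
          rw [hg'get]
          by_cases ha : r = row ∧ c = col
          · rw [if_pos ha, ha.1, ha.2, ← hslot row col, hh]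
            rfl
          · rw [if_neg ha]
            by_cases hb : r = rst ∧ c = col
            · rw [if_pos hb, hb.1, hb.2, ← hslot rst col, hdash]
              rfl
            · rw [if_neg hb]
              exact hslot r c
        · intro c
          unfold pvK
          rw [hglen']
          by_cases hcc : c = col
          · subst hcc
            have hswap : (List.range g.length).countP
                  (fun r => pvGet2 (pvSet2 (pvSet2 g rst c "#") row c "-") r c == "#") =
                (List.range g.length).countP (fun r => pvGet2 g r c == "#") := by
              apply pvCountP_range_swap g.length rst row _ _ hrstg hrowg hrstrow
              · rw [hg'get, if_neg (fun h => hrstrow h.1), if_pos ⟨rfl, rfl⟩]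
                rfl
              · rw [hdash]
                rfl
              · rw [hg'get, if_pos ⟨rfl, rfl⟩]
                rfl
              · rw [hh]
                rfl
              · intro i hia hib
                rw [hg'get, if_neg (fun h => hib h.1), if_neg (fun h => hia h.1)]
            rw [hswap]
            exact hK c
          · have hcong : (List.range g.length).countP
                  (fun r => pvGet2 (pvSet2 (pvSet2 g rst col "#") row col "-") r c == "#") =
                (List.range g.length).countP (fun r => pvGet2 g r c == "#") := by
              apply List.countP_congr
              intro x _
              rw [hg'get, if_neg (fun h => hcc h.2), if_neg (fun h => hcc h.2)]
            rw [hcong]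
            exact hK c
      · intro r c r' hcw hpos hlt hH
        by_cases hcc : c = col
        · subst hcc
          rcases hpos with hp1 | ⟨hp1, _⟩
          · exfalso
            rw [hg'get, if_neg (fun h => by omega : ¬(r = row ∧ c = c)),
              if_neg (fun h => by omega : ¬(r = rst ∧ c = c))] at hH
            exact hnoup r hp1 hH
          · exfalso
            subst hp1
            rw [hg'get, if_pos ⟨rfl, rfl⟩] at hH
            exact absurd hH (by decide)
        · rw [hg'get, if_neg (fun h => hcc h.2), if_neg (fun h => hcc h.2)] at hH
          rw [hg'get, if_neg (fun h => hcc h.2), if_neg (fun h => hcc h.2)]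
          apply hS r c r' hcw ?_ hlt hH
          rcases hpos with hp1 | ⟨hp1, hp2⟩
          · exact Or.inl hp1
          · exact Or.inr ⟨hp1, by omega⟩

-- ---------- the loop folds ----------
theorem pvColFold (lst : List (List String))
    (pre : ∀ r < lst.length, pvWidth lst ≤ (lst.getD r []).length)
    (row : Nat) (hrow : row < lst.length) :
    ∀ (cnt col : Nat) (g : List (List String)), col + cnt ≤ pvWidth lst →
      pvInv lst g → pvSettled lst g row col →
      pvInv lst ((List.range' col cnt).foldl (fun g2 c => pvBodyA g2 row c) g) ∧
      pvSettled lst ((List.range' col cnt).foldl (fun g2 c => pvBodyA g2 row c) g) row (col+cnt) := by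
  intro cnt
  induction cnt with
  | zero => intro col g _ h1 h2; exact ⟨h1, h2⟩
  | succ m ih =>
      intro col g hle h1 h2
      rw [List.range'_succ, List.foldl_cons]
      have step := pvBody_step lst g row col pre hrow (by omega) h1 h2
      have := ih (col+1) (pvBodyA g row col) (by omega) step.1 step.2
      refine ⟨this.1, ?_⟩
      have : col + (m+1) = (col+1) + m := by omega
      rw [this]
      exact (ih (col+1) (pvBodyA g row col) (by omega) step.1 step.2).2

theorem pvSettled_next (lst g : List (List String)) (row : Nat)
    (h : pvSettled lst g row (pvWidth lst)) : pvSettled lst g (row+1) 0 := by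
  intro r c r' hcw hpos hlt hH
  apply h r c r' hcw ?_ hlt hH
  rcases hpos with h1 | ⟨h1, h2⟩
  · by_cases hr : r < row
    · exact Or.inl hr
    · exact Or.inr ⟨by omega, hcw⟩
  · omega

theorem pvRowFold (lst : List (List String))
    (pre : ∀ r < lst.length, pvWidth lst ≤ (lst.getD r []).length) :
    ∀ (cnt row : Nat) (g : List (List String)), row + cnt ≤ lst.length →
      pvInv lst g → pvSettled lst g row 0 →
      pvInv lst ((List.range' row cnt).foldl
        (fun g r => (List.range (g.getD 0 []).length).foldl (fun g2 col => pvBodyA g2 r col) g) g) ∧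
      pvSettled lst ((List.range' row cnt).foldl
        (fun g r => (List.range (g.getD 0 []).length).foldl (fun g2 col => pvBodyA g2 r col) g) g)
        (row+cnt) 0 := by
  intro cnt
  induction cnt with
  | zero => intro row g _ h1 h2; exact ⟨h1, h2⟩
  | succ m ih =>
      intro row g hle h1 h2
      rw [List.range'_succ, List.foldl_cons]
      have hw : (g.getD 0 []).length = pvWidth lst := by
        rw [h1.2.1 0]; rfl
      rw [hw, List.range_eq_range']
      have step := pvColFold lst pre row (by omega) (pvWidth lst) 0 g (by omega) h1 h2
      have hs' : pvSettled lst ((List.range' 0 (pvWidth lst)).foldl (fun g2 c => pvBodyA g2 row c) g) (row+1) 0 :=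
        pvSettled_next lst _ row (by simpa using step.2)
      have := ih (row+1) _ (by omega) step.1 hs'
      refine ⟨this.1, ?_⟩
      have heq : row + (m+1) = (row+1) + m := by omega
      rw [heq]
      exact this.2

-- ---------- final characterization of A's result ----------
theorem pvSlot_cases (s : String) (h : pvSlot s = true) : s = "#" ∨ s = "-" := by
  simpa [pvSlot] using h

theorem pvFinal_cell (lst g : List (List String)) (hInv : pvInv lst g)
    (hS : pvSettled lst g lst.length 0) (r c : Nat) (hr : r < lst.length)
    (hcw : c < pvWidth lst) (hslot : pvSlot (pvGet2 lst r c) = true) :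
    pvGet2 g r c = (if pvSB lst r c < pvK lst c then "#" else "-") := by
  obtain ⟨hlen, hrlen, hpres, hsl, hK⟩ := hInv
  have hsg : pvSlot (pvGet2 g r c) = true := by rw [hsl r c]; exact hslot
  have happ : List.range' 0 (r+1) ++ List.range' (r+1) (lst.length-(r+1)) = List.range lst.length := by
    have h := List.range'_append (s := 0) (m := r+1) (n := lst.length-(r+1)) (step := 1)
    simp only [Nat.one_mul, Nat.zero_add] at h
    rw [h, List.range_eq_range']
    congr 1
    omega
  have hKsplit : pvK g c = (List.range' 0 (r+1)).countP (fun r' => pvGet2 g r' c == "#") +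
      (List.range' (r+1) (lst.length-(r+1))).countP (fun r' => pvGet2 g r' c == "#") := by
    unfold pvK
    rw [hlen, ← happ, List.countP_append]
  rcases pvSlot_cases _ hsg with hHash | hDash
  · -- the cell holds '#': every slot below holds '#' too
    have hsuffix : (List.range' (r+1) (lst.length-(r+1))).countP (fun r' => pvGet2 g r' c == "#") =
        pvSB lst r c := by
      apply List.countP_congr
      intro r' hmem
      rw [List.mem_range'_1] at hmem
      by_cases hsl' : pvSlot (pvGet2 lst r' c) = true
      · have hg' : pvSlot (pvGet2 g r' c) = true := by rw [hsl r' c]; exact hsl'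
        rcases pvSlot_cases _ hg' with h' | h'
        · simp [h', hsl']
        · exact absurd h' (hS r c r' hcw (Or.inl hr) (by omega) hHash)
      · have hg' : ¬ pvSlot (pvGet2 g r' c) = true := by rw [hsl r' c]; exact hsl'
        have hne : ¬ pvGet2 g r' c = "#" := fun h => hg' (by rw [h]; rfl)
        simp [hne]
        simpa using hsl'
    have hpre1 : 0 < (List.range' 0 (r+1)).countP (fun r' => pvGet2 g r' c == "#") :=
      List.countP_pos_iff.mpr ⟨r, by rw [List.mem_range'_1]; omega, by simp [hHash]⟩
    rw [if_pos ?_]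
    · exact hHash
    · rw [← hK c, hKsplit, hsuffix]
      omega
  · -- the cell holds '-': no '#' at or above it
    have hprefix : (List.range' 0 (r+1)).countP (fun r' => pvGet2 g r' c == "#") = 0 := by
      rw [List.countP_eq_zero]
      intro r' hmem
      rw [List.mem_range'_1] at hmem
      simp only [beq_iff_eq]
      intro hcontra
      by_cases hrr : r' = r
      · rw [hrr, hDash] at hcontra
        exact absurd hcontra (by decide)
      · exact hS r' c r hcw (Or.inl (by omega)) (by omega) hcontra hDash
    have hsuffix : (List.range' (r+1) (lst.length-(r+1))).countP (fun r' => pvGet2 g r' c == "#") ≤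
        pvSB lst r c := by
      apply List.countP_mono_left
      intro r' _ h'
      rw [beq_iff_eq] at h'
      have : pvSlot (pvGet2 g r' c) = true := by rw [h']; rfl
      rw [hsl r' c] at this
      exact this
    rw [if_neg ?_]
    · exact hDash
    · rw [← hK c, hKsplit, hprefix]
      omega

-- ---------- B-side lemmas ----------
theorem pvSlot_iff (v : String) : pvSlot v = true ↔ (v = "#" ∨ v = "-") := by
  simp [pvSlot]

theorem pvHeadD (lst : List (List String)) : lst.headD [] = lst.getD 0 [] := by
  cases lst <;> rfl

theorem pvGetD_map_range {α : Type} (w c : Nat) (f : Nat → α) (d : α) (h : c < w) :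
    ((List.range w).map f).getD c d = f c := by
  rw [List.getD_eq_getElem _ _ (by simpa using h)]
  simp

-- the below-table fold of port B, as a foldr
def pvF (w : Nat) (l : List (List String)) : List (List Nat) × List Nat :=
  l.foldr (fun row st =>
    (st.1 ++ [st.2],
     (List.range w).map (fun c =>
       st.2.getD c 0 + (if row.getD c "" = "#" ∨ row.getD c "" = "-" then 1 else 0))))
    ([], List.replicate w 0)

theorem pvF_spec (w : Nat) (lst : List (List String)) :
    lst.reverse.foldl (fun (st : List (List Nat) × List Nat) row =>
      (st.1 ++ [st.2],
       (List.range w).map (fun c =>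
         st.2.getD c 0 + (if row.getD c "" = "#" ∨ row.getD c "" = "-" then 1 else 0))))
      ([], List.replicate w 0) = pvF w lst := by
  rw [List.foldl_reverse]
  rfl

theorem pvF2 (w : Nat) (l : List (List String)) :
    (pvF w l).2 = (List.range w).map (fun c => l.countP (fun row => pvSlot (row.getD c ""))) := by
  induction l with
  | nil =>
      show List.replicate w 0 = _
      simp [List.map_const']
  | cons x t ih =>
      have hstep : (pvF w (x :: t)).2 = (List.range w).map (fun c =>
          (pvF w t).2.getD c 0 + (if x.getD c "" = "#" ∨ x.getD c "" = "-" then 1 else 0)) := rfl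
      rw [hstep]
      apply List.map_congr_left
      intro c hc
      rw [List.mem_range] at hc
      rw [ih, pvGetD_map_range _ _ _ _ hc, List.countP_cons]
      congr 1
      by_cases h : x.getD c "" = "#" ∨ x.getD c "" = "-"
      · rw [if_pos h, if_pos ((pvSlot_iff _).mpr h)]
      · rw [if_neg h, if_neg (fun hh => h ((pvSlot_iff _).mp hh))]

theorem pvF1 (w : Nat) (l : List (List String)) :
    (pvF w l).1.reverse = (List.range l.length).map (fun r =>
      (List.range w).map (fun c => (l.drop (r+1)).countP (fun row => pvSlot (row.getD c "")))) := by
  induction l with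
  | nil => simp [pvF]
  | cons x t ih =>
      have hstep : (pvF w (x :: t)).1 = (pvF w t).1 ++ [(pvF w t).2] := rfl
      rw [hstep]
      rw [List.reverse_append, List.length_cons, List.range_succ_eq_map, List.map_cons]
      simp only [List.reverse_cons, List.reverse_nil, List.nil_append, List.cons_append,
        List.nil_append]
      congr 1
      · rw [pvF2]
        rfl
      · rw [ih, List.map_map]
        apply List.map_congr_left
        intro r _
        rfl

theorem pvK_eq (lst : List (List String)) (c : Nat) :
    lst.countP (fun row => row.getD c "" == "#") = pvK lst c := by
  rw [pvCountP_getD_range lst _ []]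
  rfl

theorem pvSB_eq (lst : List (List String)) (r c : Nat) :
    (lst.drop (r+1)).countP (fun row => pvSlot (row.getD c "")) = pvSB lst r c := by
  rw [pvCountP_drop_range' lst (r+1) _ []]
  rfl

-- ===== VERDICT (by name: the statement is the Claim_ definition above) =====
theorem switch_gravity_on_spec : Claim_equal_switch_gravity_on := by
  intro lst _ hpre
  show switch_gravity_on lst = switch_gravity_on_alt lst
  -- precondition in indexed form
  have pre' : ∀ r < lst.length, pvWidth lst ≤ (lst.getD r []).length := by
    intro r hr
    rw [List.getD_eq_getElem _ _ hr]
    have := hpre _ (List.getElem_mem hr)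
    rwa [pvHeadD] at this
  -- run the A-side loop invariant
  have inv0 : pvInv lst lst := ⟨rfl, fun _ => rfl, fun _ _ _ => rfl, fun _ _ => rfl, fun _ => rfl⟩
  have settled0 : pvSettled lst lst 0 0 := by
    intro r c r' _ hpos _ _
    rcases hpos with h | ⟨_, h⟩ <;> omega
  have main := pvRowFold lst pre' lst.length 0 lst (by omega) inv0 settled0
  rw [show switch_gravity_on lst = (List.range' 0 lst.length).foldl
        (fun g r => (List.range (g.getD 0 []).length).foldl (fun g2 col => pvBodyA g2 r col) g) lst
      from by rw [← List.range_eq_range']; rfl]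
  set gA := (List.range' 0 lst.length).foldl
      (fun g r => (List.range (g.getD 0 []).length).foldl (fun g2 col => pvBodyA g2 r col) g) lst
  obtain ⟨hInv, hS⟩ := main
  simp only [Nat.zero_add] at hS
  -- unfold B
  show gA = switch_gravity_on_alt lst
  unfold switch_gravity_on_alt
  simp only [pvF_spec, pvHeadD]
  obtain ⟨hlen, hrlen, hpres, hsl, hK⟩ := hInv
  apply List.ext_getElem
  · rw [hlen, List.length_mapIdx]
  · intro i h1 h2
    rw [List.getElem_mapIdx]
    apply List.ext_getElem
    · have := hrlen i
      rw [List.getD_eq_getElem _ _ h1, List.getD_eq_getElem _ _ (by omega : i < lst.length)] at this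
      rw [this, List.length_mapIdx]
    · intro c hc1 hc2
      have hilst : i < lst.length := by omega
      have hclst : c < lst[i].length := by rwa [List.length_mapIdx] at hc2
      rw [List.getElem_mapIdx]
      have hlhs : gA[i][c] = pvGet2 gA i c := by
        rw [pvGet2, List.getD_eq_getElem _ _ h1, List.getD_eq_getElem _ _ hc1]
      have hv : lst[i][c] = pvGet2 lst i c := by
        rw [pvGet2, List.getD_eq_getElem _ _ hilst, List.getD_eq_getElem _ _ hclst]
      by_cases hcase : c < (lst.getD 0 []).length ∧ (lst[i][c] = "#" ∨ lst[i][c] = "-")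
      · rw [if_pos hcase, hlhs]
        have hslot : pvSlot (pvGet2 lst i c) = true := by
          rw [← hv]
          exact (pvSlot_iff _).mpr hcase.2
        rw [pvFinal_cell lst gA ⟨hlen, hrlen, hpres, hsl, hK⟩ hS i c hilst hcase.1 hslot]
        congr 1
        rw [pvF1, pvGetD_map_range _ _ _ _ hilst, pvGetD_map_range _ _ _ _ hcase.1,
          pvGetD_map_range _ _ _ _ hcase.1, pvSB_eq, pvK_eq]
      · rw [if_neg hcase, hlhs, hv]
        apply hpres
        intro hcon
        apply hcase
        refine ⟨hcon.1, ?_⟩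
        rw [hv]
        exact (pvSlot_iff _).mp hcon.2
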